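-- pv_equiv track=rewrite | github.com/SeungHune/Programming-Basic | 2018_mid/2018_fin_4.py | equalizer
-- ===== SOURCE A (Python) =====
-- def allequal(ns):
--     if len(ns) > 1:
--         a = ns[0]
--         for i in ns:
--             if(i != a):
--                 return False
--         return True
--     else:
--         return True
--
-- def adjustT(ns):
--     def loop(ns, rs):
--         if len(ns) > 1:
--             if(ns[0] == ns[1]):
--                 rs.append(ns[0])
--                 return loop(ns[1:], rs)
--             if (ns[0] < ns[1]):
--                 a = ns[0] + 1
--                 rs.append(a)
--                 return loop(ns[1:], rs)
--             if (ns[0] > ns[1]):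
--                 b = ns[0] - 1
--                 rs.append(b)
--                 return loop(ns[1:], rs)
--
--         else:
--             return rs + ns
--     return loop(ns, [])
--
-- def equalizer(ns):
--     count = 0
--     if len(ns) > 1:
--         a = allequal(ns)
--         while a == False:
--             ns = adjustT(ns)
--             count = count + 1
--             a = allequal(ns)
--     return count
-- ===== SOURCE B (Python) =====
-- def equalizer(ns):
--     count = 0
--     if len(ns) > 1:
--         while min(ns) != max(ns):
--             ns = [x + (x < y) - (x > y) for x, y in zip(ns, ns[1:])] + ns[-1:]
--             count += 1
--     return count
-- ===== Notes on version B (the rewrite author's own statement) =====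
-- stated objective: faster
-- what changed: Each convergence step is a single O(n) zip/comprehension pass (and the all-equal test a min/max scan) instead of A's recursive helper that copies the list with ns[1:] slicing at every element, making one step O(n^2).
import Mathlib
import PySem

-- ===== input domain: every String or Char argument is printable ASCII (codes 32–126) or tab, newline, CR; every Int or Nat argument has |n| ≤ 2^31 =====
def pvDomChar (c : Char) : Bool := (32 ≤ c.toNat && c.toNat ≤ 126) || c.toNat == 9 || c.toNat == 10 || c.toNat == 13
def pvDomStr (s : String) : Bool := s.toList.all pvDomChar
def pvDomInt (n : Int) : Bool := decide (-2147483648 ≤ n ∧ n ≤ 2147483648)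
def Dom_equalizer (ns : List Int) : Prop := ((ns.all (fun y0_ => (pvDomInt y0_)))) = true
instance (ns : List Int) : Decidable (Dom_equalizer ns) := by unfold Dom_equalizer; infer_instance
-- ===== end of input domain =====

-- B replaces A's quadratic per-step recursion (list slicing per element) by one linear zip pass per step; same convergence loop and return value.

-- ===== shared termination machinery (cited by name in both ports' decreasing_by) =====

-- chain-equality: all adjacent elements equal (⟺ all elements equal)
def pvAeq : List Int → Bool
  | a :: b :: t => a == b && pvAeq (b :: t)
  | _ => true

-- the one-step transform, in recursive normal form (both ports' steps are proved equal to it)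
def pvPair : List Int → List Int
  | a :: b :: t => (if a == b then a else if a < b then a + 1 else a - 1) :: pvPair (b :: t)
  | xs => xs

-- measure 1: number of suffixes that are not yet constant
def pvMu1 : List Int → ℕ
  | [] => 0
  | a :: t => pvMu1 t + (if pvAeq (a :: t) then 0 else 1)

-- measure 2: size of the rightmost nonzero adjacent gap
def pvMu2 : List Int → ℕ
  | [] => 0
  | a :: t => if pvAeq t then (a - t.headD a).natAbs else pvMu2 t

lemma pvAeq_cons {x : Int} {xs : List Int} (h : pvAeq (x :: xs) = true) : pvAeq xs = true := by
  cases xs with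
  | nil => rfl
  | cons b t => simp [pvAeq] at h; exact h.2

lemma pvAeq_fix : ∀ ns : List Int, pvAeq ns = true → pvPair ns = ns
  | [], _ => rfl
  | [a], _ => rfl
  | a :: b :: t, h => by
    simp [pvAeq] at h
    simp [pvPair, h.1, pvAeq_fix (b :: t) h.2]

lemma pvMu1_zero : ∀ ns : List Int, pvMu1 ns = 0 ↔ pvAeq ns = true := by
  intro ns
  induction ns with
  | nil => simp [pvMu1, pvAeq]
  | cons a t ih =>
    by_cases h : pvAeq (a :: t) = true
    · simp [pvMu1, h, (ih.mpr (pvAeq_cons h))]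
    · simp [pvMu1, h]

-- one step strictly decreases (pvMu1, pvMu2) lexicographically while not all equal
lemma pvDec : ∀ ns : List Int, pvAeq ns = false →
    pvMu1 (pvPair ns) < pvMu1 ns ∨
      (pvMu1 (pvPair ns) = pvMu1 ns ∧ pvMu2 (pvPair ns) < pvMu2 ns) := by
  intro ns
  induction ns with
  | nil => intro h; simp [pvAeq] at h
  | cons a t ih =>
    intro h
    cases t with
    | nil => simp [pvAeq] at h
    | cons b t =>
      by_cases hbt : pvAeq (b :: t) = true
      · -- tail already constant: the head gap shrinks by 1
        have hab : ¬ (a = b) := by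
          intro hab; rw [hab] at h; simp [pvAeq, hbt] at h
        have hfix : pvPair (b :: t) = b :: t := pvAeq_fix _ hbt
        have hm1t : pvMu1 (b :: t) = 0 := (pvMu1_zero _).mpr hbt
        set m : Int := if a == b then a else if a < b then a + 1 else a - 1 with hm
        have hmval : m = if a < b then a + 1 else a - 1 := by
          simp [hm, hab]
        have hstep : pvPair (a :: b :: t) = m :: b :: t := by
          simp [pvPair, hfix, hm]
        by_cases hmb : m = b
        · left
          rw [hstep]
          have : pvAeq (m :: b :: t) = true := by simp [pvAeq, hmb, hbt]
          rw [(pvMu1_zero _).mpr this]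
          simp [pvMu1, h]
        · right
          have haeqm : pvAeq (m :: b :: t) = false := by
            simp [pvAeq, hbt]; exact hmb
          constructor
          · rw [hstep]
            simp [pvMu1, haeqm, h]
          · rw [hstep]
            simp only [pvMu2, hbt, if_pos, List.headD]
            rw [hmval]
            rcases lt_trichotomy a b with hlt | heq | hgt
            · simp [hlt]; omega
            · exact absurd heq hab
            · have : ¬ a < b := not_lt.mpr (le_of_lt hgt)
              simp [this]; omega
      · -- tail not constant: induct on the tail
        have hbt' : pvAeq (b :: t) = false := by
          cases hx : pvAeq (b :: t) with
          | false => rfl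
          | true => exact absurd hx hbt
        have haeq : pvAeq (a :: b :: t) = false := by simp [pvAeq, hbt']
        set m : Int := if a == b then a else if a < b then a + 1 else a - 1 with hm
        have hstep : pvPair (a :: b :: t) = m :: pvPair (b :: t) := by
          simp [pvPair, hm]
        rcases ih hbt' with h1 | ⟨h1, h2⟩
        · left
          rw [hstep]
          have : pvMu1 (m :: pvPair (b :: t)) ≤ pvMu1 (pvPair (b :: t)) + 1 := by
            simp [pvMu1]; split <;> omega
          have hns : pvMu1 (a :: b :: t) = pvMu1 (b :: t) + 1 := by
            simp [pvMu1, haeq]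
          omega
        · right
          have hPne : pvAeq (pvPair (b :: t)) = false := by
            cases hx : pvAeq (pvPair (b :: t)) with
            | false => rfl
            | true =>
              have := (pvMu1_zero (pvPair (b :: t))).mpr hx
              rw [h1] at this
              exact absurd ((pvMu1_zero _).mp this) (by simp [hbt'])
          have haeqm : pvAeq (m :: pvPair (b :: t)) = false := by
            cases hP : pvPair (b :: t) with
            | nil => rw [hP] at hPne; simp [pvAeq] at hPne
            | cons p r =>
              rw [hP] at hPne
              simp [pvAeq, hPne]
          constructor
          · rw [hstep]
            simp [pvMu1, haeqm, haeq, h1]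
          · rw [hstep]
            simp only [pvMu2, hPne, hbt', if_neg, Bool.false_eq_true, not_false_iff]
            exact h2

-- ===== PORT A =====

-- helper allequal
def pyAllequal (ns : List Int) : Bool :=
  if 1 < ns.length then
    match ns with
    | a :: _ => ns.all (fun i => i == a)   -- for-loop with early return = all
    | [] => true
  else true

-- helper adjustT's inner loop (rs is the accumulator list)
def pyAdjustLoop : List Int → List Int → List Int
  | a :: b :: t, rs =>
    if a == b then pyAdjustLoop (b :: t) (rs ++ [a])
    else if a < b then pyAdjustLoop (b :: t) (rs ++ [a + 1])
    else pyAdjustLoop (b :: t) (rs ++ [a - 1])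
  | ns, rs => rs ++ ns

def pyAdjustT (ns : List Int) : List Int := pyAdjustLoop ns []

lemma pyAdjustLoop_eq : ∀ (ns rs : List Int), pyAdjustLoop ns rs = rs ++ pvPair ns
  | [], rs => by simp [pyAdjustLoop, pvPair]
  | [a], rs => by simp [pyAdjustLoop, pvPair]
  | a :: b :: t, rs => by
    simp only [pyAdjustLoop, pvPair]
    split
    · rw [pyAdjustLoop_eq (b :: t)]; simp_all
    · split
      · rw [pyAdjustLoop_eq (b :: t)]; simp_all
      · rw [pyAdjustLoop_eq (b :: t)]; simp_all

lemma pyAdjustT_eq (ns : List Int) : pyAdjustT ns = pvPair ns := by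
  simp [pyAdjustT, pyAdjustLoop_eq]

lemma pyAllequal_aux : ∀ (t : List Int) (x : Int), t.all (fun i => i == x) = pvAeq (x :: t) := by
  intro t
  induction t with
  | nil => intro x; simp [pvAeq]
  | cons b t ih =>
    intro x
    by_cases h : b = x
    · subst h
      simp [pvAeq, ih b]
    · have h1 : (b == x) = false := by simp [h]
      have h2 : (x == b) = false := by simp [Ne.symm h]
      simp [pvAeq, h1, h2]

lemma pyAllequal_eq (ns : List Int) : pyAllequal ns = pvAeq ns := by
  match ns with
  | [] => rfl
  | [a] => rfl
  | a :: b :: t =>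
    simp only [pyAllequal, List.length_cons]
    have : 1 < t.length + 1 + 1 := by omega
    rw [if_pos this]
    simpa using pyAllequal_aux (b :: t) a

lemma pyAdjustT_dec (ns : List Int) (h : pvAeq ns = false) :
    Prod.Lex (· < ·) (· < ·) (pvMu1 (pyAdjustT ns), pvMu2 (pyAdjustT ns)) (pvMu1 ns, pvMu2 ns) := by
  rw [pyAdjustT_eq]
  rcases pvDec ns h with h1 | ⟨h1, h2⟩
  · exact Prod.Lex.left _ _ h1
  · rw [h1]; exact Prod.Lex.right _ h2

-- the while loop of equalizer
def pyEqLoop (ns : List Int) (count : Int) : Int :=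
  if pyAllequal ns = false then pyEqLoop (pyAdjustT ns) (count + 1) else count
termination_by (pvMu1 ns, pvMu2 ns)
decreasing_by
  exact pyAdjustT_dec ns (by rw [← pyAllequal_eq]; simpa using ‹pyAllequal ns = false›)

def equalizer (ns : List Int) : Int :=
  if 1 < ns.length then pyEqLoop ns 0 else 0

-- ===== PORT B =====

-- one step: [x + (x < y) - (x > y) for x, y in zip(ns, ns[1:])] + ns[-1:]
def altStep (ns : List Int) : List Int :=
  (ns.zip ns.tail).map
    (fun p => p.1 + (if p.1 < p.2 then 1 else 0) - (if p.1 > p.2 then 1 else 0))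
  ++ PySem.List.slice ns (some (-1)) none

lemma altStep_cons (a b : Int) (t : List Int) :
    altStep (a :: b :: t) =
      (a + (if a < b then 1 else 0) - (if a > b then 1 else 0)) :: altStep (b :: t) := by
  simp [altStep, PySem.List.slice_from_neg_one, List.drop_succ_cons]

lemma altStep_eq : ∀ ns : List Int, altStep ns = pvPair ns
  | [] => by simp [altStep, pvPair, PySem.List.slice_from_neg_one]
  | [a] => by simp [altStep, pvPair, PySem.List.slice_from_neg_one]
  | a :: b :: t => by
    rw [altStep_cons, altStep_eq (b :: t)]
    simp only [pvPair]
    congr 1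
    rcases lt_trichotomy a b with h | h | h
    · simp [h, not_lt.mpr (le_of_lt h), ne_of_lt h]
    · simp [h]
    · simp [not_lt.mpr (le_of_lt h), h, (ne_of_gt h)]

lemma pvFoldlMin_le_acc : ∀ (t : List Int) (x : Int), t.foldl min x ≤ x := by
  intro t
  induction t with
  | nil => intro x; simp
  | cons a t ih =>
    intro x
    calc (a :: t).foldl min x = t.foldl min (min x a) := by simp
    _ ≤ min x a := ih _
    _ ≤ x := min_le_left _ _

lemma pvAcc_le_foldlMax : ∀ (t : List Int) (x : Int), x ≤ t.foldl max x := by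
  intro t
  induction t with
  | nil => intro x; simp
  | cons a t ih =>
    intro x
    calc x ≤ max x a := le_max_left _ _
    _ ≤ t.foldl max (max x a) := ih _
    _ = (a :: t).foldl max x := by simp

lemma pvFoldlMin_le_mem : ∀ (t : List Int) (x y : Int), y ∈ t → t.foldl min x ≤ y := by
  intro t
  induction t with
  | nil => intro x y h; simp at h
  | cons a t ih =>
    intro x y h
    rcases List.mem_cons.mp h with rfl | h
    · calc (y :: t).foldl min x = t.foldl min (min x y) := by simp
      _ ≤ min x y := pvFoldlMin_le_acc _ _
      _ ≤ y := min_le_right _ _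
    · simpa using ih (min x a) y h

lemma pvMem_le_foldlMax : ∀ (t : List Int) (x y : Int), y ∈ t → y ≤ t.foldl max x := by
  intro t
  induction t with
  | nil => intro x y h; simp at h
  | cons a t ih =>
    intro x y h
    rcases List.mem_cons.mp h with rfl | h
    · calc y ≤ max x y := le_max_right _ _
      _ ≤ t.foldl max (max x y) := pvAcc_le_foldlMax _ _
      _ = (y :: t).foldl max x := by simp
    · simpa using ih (max x a) y h

lemma pvFoldl_const_min : ∀ (t : List Int) (x : Int), (∀ y ∈ t, y = x) → t.foldl min x = x := by
  intro t
  induction t with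
  | nil => intro x _; simp
  | cons a t ih =>
    intro x h
    have ha : a = x := h a (List.mem_cons_self)
    subst ha
    simp only [List.foldl_cons, min_self]
    exact ih a (fun y hy => h y (List.mem_cons_of_mem _ hy))

lemma pvFoldl_const_max : ∀ (t : List Int) (x : Int), (∀ y ∈ t, y = x) → t.foldl max x = x := by
  intro t
  induction t with
  | nil => intro x _; simp
  | cons a t ih =>
    intro x h
    have ha : a = x := h a (List.mem_cons_self)
    subst ha
    simp only [List.foldl_cons, max_self]
    exact ih a (fun y hy => h y (List.mem_cons_of_mem _ hy))

lemma pvAeq_forall : ∀ (t : List Int) (x : Int), pvAeq (x :: t) = true ↔ ∀ y ∈ t, y = x := by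
  intro t
  induction t with
  | nil => intro x; simp [pvAeq]
  | cons b t ih =>
    intro x
    constructor
    · intro h y hy
      simp only [pvAeq, Bool.and_eq_true, beq_iff_eq] at h
      rcases List.mem_cons.mp hy with rfl | hy
      · exact h.1.symm
      · rw [(ih b).mp h.2 y hy, h.1]
    · intro h
      have hb : b = x := h b (List.mem_cons_self)
      simp only [pvAeq, Bool.and_eq_true, beq_iff_eq]
      exact ⟨hb.symm, (ih b).mpr (fun y hy => by rw [h y (List.mem_cons_of_mem _ hy), hb])⟩

lemma pvMinMax_iff (ns : List Int) :
    (PySem.List.min? ns (fun x => x) = PySem.List.max? ns (fun x => x)) ↔ pvAeq ns = true := by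
  cases ns with
  | nil => simp [PySem.List.min?, PySem.List.max?, pvAeq]
  | cons x t =>
    rw [PySem.List.min?_id_cons, PySem.List.max?_id_cons]
    rw [pvAeq_forall t x]
    constructor
    · intro h
      have h' : t.foldl min x = t.foldl max x := by simpa using h
      have h1 := pvFoldlMin_le_acc t x
      have h2 := pvAcc_le_foldlMax t x
      intro y hy
      have h3 := pvFoldlMin_le_mem t x y hy
      have h4 := pvMem_le_foldlMax t x y hy
      omega
    · intro h
      rw [pvFoldl_const_min t x h, pvFoldl_const_max t x h]

lemma altStep_dec (ns : List Int)
    (h : ¬ PySem.List.min? ns (fun x => x) = PySem.List.max? ns (fun x => x)) :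
    Prod.Lex (· < ·) (· < ·) (pvMu1 (altStep ns), pvMu2 (altStep ns)) (pvMu1 ns, pvMu2 ns) := by
  rw [altStep_eq]
  have haeq : pvAeq ns = false := by
    cases hx : pvAeq ns with
    | false => rfl
    | true => exact absurd ((pvMinMax_iff ns).mpr hx) h
  rcases pvDec ns haeq with h1 | ⟨h1, h2⟩
  · exact Prod.Lex.left _ _ h1
  · rw [h1]; exact Prod.Lex.right _ h2

-- the while loop: while min(ns) != max(ns)
def altLoop (ns : List Int) (count : Int) : Int :=
  if PySem.List.min? ns (fun x => x) ≠ PySem.List.max? ns (fun x => x) then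
    altLoop (altStep ns) (count + 1)
  else count
termination_by (pvMu1 ns, pvMu2 ns)
decreasing_by
  exact altStep_dec ns ‹_›

def equalizer_alt (ns : List Int) : Int :=
  if 1 < ns.length then altLoop ns 0 else 0

-- ===== PRECONDITION & SPEC =====
def Spec_equalizer (ns : List Int) (out : Int) : Prop := out = equalizer_alt ns
instance (ns : List Int) (out : Int) : Decidable (Spec_equalizer ns out) := by unfold Spec_equalizer; infer_instance

-- ===== CLAIM (what is proved, stated in full; the proofs are below) =====
def Claim_equal_equalizer : Prop := ∀ (ns : List Int), Dom_equalizer ns → Spec_equalizer ns (equalizer ns)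

-- ===== LEMMAS AND PROOFS =====

lemma pvLoops_eq : ∀ (ns : List Int) (count : Int), pyEqLoop ns count = altLoop ns count := by
  intro ns count
  induction ns, count using pyEqLoop.induct with
  | case1 ns count hguard ih =>
    rw [pyEqLoop, if_pos hguard, altLoop, ih, pyAdjustT_eq, ← altStep_eq]
    rw [if_pos]
    intro hmm
    rw [pyAllequal_eq] at hguard
    rw [(pvMinMax_iff ns).mp hmm] at hguard
    simp at hguard
  | case2 ns count hguard =>
    rw [pyEqLoop, if_neg hguard, altLoop, if_neg]
    intro hmm
    apply hguard
    rw [pyAllequal_eq]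
    cases hx : pvAeq ns with
    | true => exact absurd ((pvMinMax_iff ns).mpr hx) hmm
    | false => rfl

-- ===== VERDICT (by name: the statement is the Claim_ definition above) =====
theorem equalizer_spec : Claim_equal_equalizer := by
  intro ns _
  unfold Spec_equalizer equalizer equalizer_alt
  split
  · exact pvLoops_eq ns 0
  · rfl
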